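-- pv_equiv track=rewrite | github.com/maximilianKoeper/melp | melp/taft/utils/cosmic.py | get_single_tracks_primary_mc
-- ===== SOURCE A (Python) =====
-- def get_single_tracks_primary_mc(tilehit_ids: list, tilehit_times: list, tilehit_primaries: list) -> dict:
--     single_events = {}
--
--     tmp_primary_reference = tilehit_primaries[0]
--     index_start_track = 0
--     for index in range(len(tilehit_times)):
--         if tilehit_primaries[index] != tmp_primary_reference:
--             single_events[index] = [tilehit_ids[index_start_track:index], tilehit_times[index_start_track:index]]
--             index_start_track = index
--             tmp_primary_reference = tilehit_primaries[index]
--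
--     # fill up remaining event
--     if index_start_track != len(tilehit_times):
--         single_events[len(tilehit_times)] = [tilehit_ids[index_start_track:],
--                                              tilehit_times[index_start_track:]]
--
--     # delete entries with only one hit
--     keys_to_delete = []
--     for key in single_events:
--         if len(single_events[key][0]) == 1:
--             keys_to_delete.append(key)
--
--     for key in keys_to_delete:
--         del single_events[key]
--
--     return single_events
-- ===== SOURCE B (Python) =====
-- def get_single_tracks_primary_mc(tilehit_ids: list, tilehit_times: list, tilehit_primaries: list) -> dict:
--     runs = _primary_runs(tilehit_ids, tilehit_times, tilehit_primaries, 0, len(tilehit_times))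
--     return {end: event for end, event in runs if len(event[0]) != 1}
--
--
-- def _primary_runs(ids, times, primaries, base, n):
--     # Peel the leading run of equal primaries off the three tails and recurse
--     # on the remainder; each run is keyed by its exclusive end index.
--     if n == 0:
--         return []
--     j = 1
--     while j < n and primaries[j] == primaries[0]:
--         j += 1
--     if j == n:
--         return [(base + n, [ids, times])]
--     return [(base + j, [ids[:j], times[:j]])] + _primary_runs(
--         ids[j:], times[j:], primaries[j:], base + j, n - j)
-- ===== Notes on version B (the rewrite author's own statement) =====
-- stated objective: alternative
-- what changed: Replaces A's single index loop with change-detection against a running reference plus a trailing fill-up and a build-then-delete key cleanup pass by a structural recursion that peels one run of equal primaries off the three list tails at a time and a final comprehension that keeps only non-singleton runs.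
import Mathlib
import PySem

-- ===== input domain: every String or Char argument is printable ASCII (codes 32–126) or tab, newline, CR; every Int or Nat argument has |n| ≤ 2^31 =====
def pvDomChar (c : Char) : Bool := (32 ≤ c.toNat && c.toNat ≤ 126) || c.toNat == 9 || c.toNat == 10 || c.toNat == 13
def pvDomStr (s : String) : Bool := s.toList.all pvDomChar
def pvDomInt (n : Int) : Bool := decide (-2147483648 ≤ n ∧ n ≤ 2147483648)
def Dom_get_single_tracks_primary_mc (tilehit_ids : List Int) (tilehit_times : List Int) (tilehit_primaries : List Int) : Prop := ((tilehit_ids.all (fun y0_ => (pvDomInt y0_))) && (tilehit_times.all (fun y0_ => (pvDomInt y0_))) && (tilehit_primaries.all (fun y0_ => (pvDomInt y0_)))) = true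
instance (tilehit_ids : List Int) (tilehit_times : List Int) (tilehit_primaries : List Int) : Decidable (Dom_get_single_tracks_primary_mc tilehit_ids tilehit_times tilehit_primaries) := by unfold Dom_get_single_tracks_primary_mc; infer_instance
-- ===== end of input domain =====

-- B replaces A's index loop with change detection, trailing fill-up and build-then-delete key
-- cleanup by a structural recursion peeling one run of equal primaries off the list tails, with
-- a final comprehension keeping non-singleton runs (alternative decomposition, same cost).

-- ===== PORT A =====
-- One iteration of A's `for index in range(len(tilehit_times))` loop; the state is
-- (single_events, index_start_track, tmp_primary_reference).  `tilehit_primaries[index]` is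
-- ported as `List.getD` — exact, since Pre_ gives index < len(tilehit_times) ≤ len(tilehit_primaries).
def aStep (tilehit_ids tilehit_times tilehit_primaries : List Int)
    (st : PySem.Dict Int (List (List Int)) × Nat × Int) (index : Nat) :
    PySem.Dict Int (List (List Int)) × Nat × Int :=
  if tilehit_primaries.getD index 0 ≠ st.2.2 then
    (st.1.insert (index : Int)
       [PySem.List.slice tilehit_ids (some (st.2.1 : Int)) (some (index : Int)),
        PySem.List.slice tilehit_times (some (st.2.1 : Int)) (some (index : Int))],
     index, tilehit_primaries.getD index 0)
  else st

def get_single_tracks_primary_mc (tilehit_ids : List Int) (tilehit_times : List Int) (tilehit_primaries : List Int) : List (Int × List (List Int)) :=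
  -- tmp_primary_reference = tilehit_primaries[0]: exact under Pre_ (tilehit_primaries ≠ [])
  let st := (List.range tilehit_times.length).foldl
    (aStep tilehit_ids tilehit_times tilehit_primaries)
    (PySem.Dict.mk [], 0, tilehit_primaries.getD 0 0)
  -- fill up remaining event
  let single_events :=
    if st.2.1 ≠ tilehit_times.length then
      st.1.insert (tilehit_times.length : Int)
        [PySem.List.slice tilehit_ids (some (st.2.1 : Int)) none,
         PySem.List.slice tilehit_times (some (st.2.1 : Int)) none]
    else st.1
  -- delete entries with only one hit (single_events[key] is present, so getD is exact)
  let keys_to_delete := single_events.keys.foldl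
    (fun ks key => if ((single_events.getD key []).getD 0 []).length = 1 then ks ++ [key] else ks)
    ([] : List Int)
  (keys_to_delete.foldl (fun d key => d.erase key) single_events).items

-- ===== PORT B =====
-- inner `while j < n and primaries[j] == primaries[0]: j += 1` of _primary_runs in Source B;
-- the getD accesses are exact under Pre_ (each recursive tail keeps len(primaries) ≥ n)
def bScan (primaries : List Int) (n : Nat) (j : Nat) : Nat :=
  if h : j < n ∧ primaries.getD j 0 = primaries.getD 0 0 then bScan primaries n (j + 1) else j
termination_by n - j
decreasing_by omega

-- needed by bRuns' termination: the scan never moves j backwards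
theorem le_bScan (primaries : List Int) (n j : Nat) : j ≤ bScan primaries n j := by
  fun_induction bScan <;> omega

-- `_primary_runs(ids, times, primaries, base, n)` of Source B
def bRuns (ids times primaries : List Int) (base n : Nat) : List (Int × List (List Int)) :=
  if _h : n = 0 then []
  else
    let j := bScan primaries n 1
    if j = n then [(((base + n : Nat) : Int), [ids, times])]
    else (((base + j : Nat) : Int),
           [PySem.List.slice ids none (some (j : Int)),
            PySem.List.slice times none (some (j : Int))]) ::
      bRuns (PySem.List.slice ids (some (j : Int)) none)
            (PySem.List.slice times (some (j : Int)) none)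
            (PySem.List.slice primaries (some (j : Int)) none)
            (base + j) (n - j)
termination_by n
decreasing_by have := le_bScan primaries n 1; omega

def get_single_tracks_primary_mc_alt (tilehit_ids : List Int) (tilehit_times : List Int) (tilehit_primaries : List Int) : List (Int × List (List Int)) :=
  -- {end: event for end, event in runs if len(event[0]) != 1}
  ((bRuns tilehit_ids tilehit_times tilehit_primaries 0 tilehit_times.length).foldl
    (fun d kv => if (kv.2.getD 0 []).length ≠ 1 then d.insert kv.1 kv.2 else d)
    (PySem.Dict.mk [])).items

-- ===== PRECONDITION & SPEC =====
-- Exactly the inputs on which the Python A returns: A raises IndexError at tilehit_primaries[0]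
-- when tilehit_primaries is empty, and at tilehit_primaries[index] when it is shorter than tilehit_times.
def Pre_get_single_tracks_primary_mc (tilehit_ids : List Int) (tilehit_times : List Int) (tilehit_primaries : List Int) : Prop :=
  tilehit_primaries ≠ [] ∧ tilehit_times.length ≤ tilehit_primaries.length
instance (tilehit_ids : List Int) (tilehit_times : List Int) (tilehit_primaries : List Int) : Decidable (Pre_get_single_tracks_primary_mc tilehit_ids tilehit_times tilehit_primaries) := by unfold Pre_get_single_tracks_primary_mc; infer_instance

def pvWitness_get_single_tracks_primary_mc : List Int × List Int × List Int :=
  ([1, 2, 3, 4], [10, 20, 30, 40], [7, 7, 8, 8])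

def Spec_get_single_tracks_primary_mc (tilehit_ids : List Int) (tilehit_times : List Int) (tilehit_primaries : List Int) (out : List (Int × List (List Int))) : Prop := out = get_single_tracks_primary_mc_alt tilehit_ids tilehit_times tilehit_primaries
instance (tilehit_ids : List Int) (tilehit_times : List Int) (tilehit_primaries : List Int) (out : List (Int × List (List Int))) : Decidable (Spec_get_single_tracks_primary_mc tilehit_ids tilehit_times tilehit_primaries out) := by unfold Spec_get_single_tracks_primary_mc; infer_instance

-- ===== CLAIM (what is proved, stated in full; the proofs are below) =====
def Claim_equal_get_single_tracks_primary_mc : Prop := ∀ (tilehit_ids : List Int) (tilehit_times : List Int) (tilehit_primaries : List Int), Dom_get_single_tracks_primary_mc tilehit_ids tilehit_times tilehit_primaries → Pre_get_single_tracks_primary_mc tilehit_ids tilehit_times tilehit_primaries → Spec_get_single_tracks_primary_mc tilehit_ids tilehit_times tilehit_primaries (get_single_tracks_primary_mc tilehit_ids tilehit_times tilehit_primaries)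

-- ===== LEMMAS AND PROOFS =====

-- A's run-end scan, written with absolute indices: the first k ≥ j with k = n or primaries[k] ≠ p
def bRunEnd (tilehit_primaries : List Int) (n : Nat) (p : Int) (j : Nat) : Nat :=
  if h : j < n ∧ tilehit_primaries.getD j 0 = p then bRunEnd tilehit_primaries n p (j + 1) else j
termination_by n - j
decreasing_by omega

theorem le_bRunEnd (tilehit_primaries : List Int) (n : Nat) (p : Int) (j : Nat) :
    j ≤ bRunEnd tilehit_primaries n p j := by
  fun_induction bRunEnd <;> omega

-- The list of runs of consecutive equal primaries starting at i, each keyed by its exclusive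
-- end index, with the value both ports commit for it.  Both ports are reduced to this list.
def runsP (tilehit_ids tilehit_times tilehit_primaries : List Int) (n : Nat) (i : Nat) :
    List (Int × List (List Int)) :=
  if h : i < n then
    let j := bRunEnd tilehit_primaries n (tilehit_primaries.getD i 0) (i + 1)
    ((j : Int),
      [(if j < n then PySem.List.slice tilehit_ids (some (i : Int)) (some (j : Int))
        else PySem.List.slice tilehit_ids (some (i : Int)) none),
       PySem.List.slice tilehit_times (some (i : Int)) (some (j : Int))]) ::
      runsP tilehit_ids tilehit_times tilehit_primaries n j
  else []
termination_by n - i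
decreasing_by have := le_bRunEnd tilehit_primaries n (tilehit_primaries.getD i 0) (i + 1); omega

theorem bRunEnd_le (tilehit_primaries : List Int) (n : Nat) (p : Int) (j : Nat) (h : j ≤ n) :
    bRunEnd tilehit_primaries n p j ≤ n := by
  fun_induction bRunEnd with
  | case1 j h' ih => exact ih (by omega)
  | case2 j h' => exact h

theorem bRunEnd_mid (tilehit_primaries : List Int) (n : Nat) (p : Int) (j : Nat) :
    ∀ m, j ≤ m → m < bRunEnd tilehit_primaries n p j → tilehit_primaries.getD m 0 = p := by
  fun_induction bRunEnd with
  | case1 j h ih =>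
    intro m hm hm'
    rcases Nat.eq_or_lt_of_le hm with rfl | hlt
    · exact h.2
    · exact ih m (by omega) hm'
  | case2 j h =>
    intro m hm hm'
    omega

theorem bRunEnd_stop (tilehit_primaries : List Int) (n : Nat) (p : Int) (j : Nat)
    (h : bRunEnd tilehit_primaries n p j < n) :
    tilehit_primaries.getD (bRunEnd tilehit_primaries n p j) 0 ≠ p := by
  fun_induction bRunEnd with
  | case1 j h' ih => exact ih h
  | case2 j h' =>
    intro hc
    exact h' ⟨h, hc⟩

-- A's loop does nothing while the primary equals the reference
theorem afold_skip (tilehit_ids tilehit_times tilehit_primaries : List Int) :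
    ∀ (len a : Nat) (st : PySem.Dict Int (List (List Int)) × Nat × Int),
      (∀ m, a ≤ m → m < a + len → tilehit_primaries.getD m 0 = st.2.2) →
      (List.range' a len).foldl (aStep tilehit_ids tilehit_times tilehit_primaries) st = st := by
  intro len
  induction len with
  | zero => intro a st _; rfl
  | succ k ih =>
    intro a st hmid
    rw [List.range'_succ]
    have h0 : tilehit_primaries.getD a 0 = st.2.2 := hmid a (le_refl a) (by omega)
    have : aStep tilehit_ids tilehit_times tilehit_primaries st a = st := by
      unfold aStep
      rw [if_neg (fun hc => hc h0)]
    rw [List.foldl_cons, this]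
    exact ih (a + 1) st (fun m h1 h2 => hmid m (by omega) (by omega))

-- every key in runsP i is a Nat strictly between i and n
theorem runsP_keys (tilehit_ids tilehit_times tilehit_primaries : List Int) (n : Nat) :
    ∀ i, ∀ x ∈ runsP tilehit_ids tilehit_times tilehit_primaries n i,
      ∃ m : Nat, x.1 = (m : Int) ∧ i < m ∧ m ≤ n := by
  intro i
  fun_induction runsP with
  | case1 i h j ih =>
    have hj : j = bRunEnd tilehit_primaries n (tilehit_primaries.getD i 0) (i + 1) := rfl
    have hj1 : i + 1 ≤ bRunEnd tilehit_primaries n (tilehit_primaries.getD i 0) (i + 1) :=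
      le_bRunEnd tilehit_primaries n (tilehit_primaries.getD i 0) (i + 1)
    have hj2 : bRunEnd tilehit_primaries n (tilehit_primaries.getD i 0) (i + 1) ≤ n :=
      bRunEnd_le tilehit_primaries n (tilehit_primaries.getD i 0) (i + 1) (by omega)
    intro x hx
    rw [List.mem_cons] at hx
    rcases hx with rfl | hx'
    · exact ⟨j, rfl, by omega, by omega⟩
    · obtain ⟨m, h1, h2, h3⟩ := ih x hx'
      exact ⟨m, h1, by omega, h3⟩
  | case2 i h =>
    intro x hx
    simp at hx

-- keys of runsP are pairwise distinct
theorem runsP_pairwise (tilehit_ids tilehit_times tilehit_primaries : List Int) (n : Nat) :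
    ∀ i, (runsP tilehit_ids tilehit_times tilehit_primaries n i).Pairwise (fun a b => a.1 ≠ b.1) := by
  intro i
  fun_induction runsP with
  | case1 i h j ih =>
    refine List.Pairwise.cons ?_ ih
    intro y hy
    obtain ⟨m, hm1, hm2, _⟩ := runsP_keys tilehit_ids tilehit_times tilehit_primaries n j y hy
    simp only [hm1]
    intro hc
    have : j = m := by exact_mod_cast hc
    omega
  | case2 i h =>
    exact List.Pairwise.nil

-- unfolding equations without the let-binder (the run end written out)
theorem runsP_cons (tilehit_ids tilehit_times tilehit_primaries : List Int) (n i : Nat) (h : i < n) :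
    runsP tilehit_ids tilehit_times tilehit_primaries n i =
      ((bRunEnd tilehit_primaries n (tilehit_primaries.getD i 0) (i + 1) : Int),
        [(if bRunEnd tilehit_primaries n (tilehit_primaries.getD i 0) (i + 1) < n then
            PySem.List.slice tilehit_ids (some (i : Int))
              (some (bRunEnd tilehit_primaries n (tilehit_primaries.getD i 0) (i + 1) : Int))
          else PySem.List.slice tilehit_ids (some (i : Int)) none),
         PySem.List.slice tilehit_times (some (i : Int))
           (some (bRunEnd tilehit_primaries n (tilehit_primaries.getD i 0) (i + 1) : Int))]) ::
        runsP tilehit_ids tilehit_times tilehit_primaries n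
          (bRunEnd tilehit_primaries n (tilehit_primaries.getD i 0) (i + 1)) := by
  rw [runsP, dif_pos h]

theorem runsP_nil (tilehit_ids tilehit_times tilehit_primaries : List Int) (n i : Nat) (h : ¬ i < n) :
    runsP tilehit_ids tilehit_times tilehit_primaries n i = [] := by
  rw [runsP, dif_neg h]

-- main A-side lemma: the loop from a run start i, followed by the fill-up, appends runsP i
theorem afold_runs (tilehit_ids tilehit_times tilehit_primaries : List Int) :
    ∀ (k i : Nat) (acc : PySem.Dict Int (List (List Int))),
      i < tilehit_times.length → tilehit_times.length - i ≤ k →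
      (∀ x ∈ acc.items, ∃ m : Nat, x.1 = (m : Int) ∧ m ≤ i) →
      (let st := (List.range' (i + 1) (tilehit_times.length - (i + 1))).foldl
          (aStep tilehit_ids tilehit_times tilehit_primaries)
          (acc, i, tilehit_primaries.getD i 0);
       (if st.2.1 ≠ tilehit_times.length then
          st.1.insert (tilehit_times.length : Int)
            [PySem.List.slice tilehit_ids (some (st.2.1 : Int)) none,
             PySem.List.slice tilehit_times (some (st.2.1 : Int)) none]
        else st.1).items)
      = acc.items ++ runsP tilehit_ids tilehit_times tilehit_primaries tilehit_times.length i := by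
  intro k
  induction k with
  | zero => intro i acc hi hk hacc; omega
  | succ k ih =>
    intro i acc hi hk hacc
    have hj1 : i + 1 ≤ bRunEnd tilehit_primaries tilehit_times.length (tilehit_primaries.getD i 0) (i + 1) :=
      le_bRunEnd _ _ _ _
    have hj2 : bRunEnd tilehit_primaries tilehit_times.length (tilehit_primaries.getD i 0) (i + 1) ≤ tilehit_times.length :=
      bRunEnd_le _ _ _ _ (by omega)
    rw [runsP_cons tilehit_ids tilehit_times tilehit_primaries tilehit_times.length i hi]
    set n := tilehit_times.length with hn
    set p := tilehit_primaries.getD i 0 with hp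
    set j := bRunEnd tilehit_primaries n p (i + 1) with hj
    -- split the index range at j
    have hsplit : List.range' (i + 1) (n - (i + 1)) =
        List.range' (i + 1) (j - (i + 1)) ++ List.range' j (n - j) := by
      have h1 : (i + 1) + 1 * (j - (i + 1)) = j := by omega
      have h2 : (j - (i + 1)) + (n - j) = n - (i + 1) := by omega
      rw [← h2, ← List.range'_append, h1]
    have hskip : (List.range' (i + 1) (j - (i + 1))).foldl
        (aStep tilehit_ids tilehit_times tilehit_primaries) (acc, i, p) = (acc, i, p) := by
      apply afold_skip
      intro m hm1 hm2
      exact bRunEnd_mid tilehit_primaries n p (i + 1) m hm1 (by omega)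
    simp only [hsplit, List.foldl_append, hskip]
    by_cases hjn : j < n
    · -- non-final run: A's step at index j commits it, then the tail continues from j
      have hstop : tilehit_primaries.getD j 0 ≠ p := bRunEnd_stop tilehit_primaries n p (i + 1) hjn
      have hnj : n - j = (n - j - 1) + 1 := by omega
      rw [hnj, List.range'_succ, List.foldl_cons]
      have hfresh : acc.contains ((j : Nat) : Int) = false := by
        rw [PySem.Dict.contains_eq_decide_mem_keys]
        simp only [decide_eq_false_iff_not, PySem.Dict.keys, List.mem_map]
        rintro ⟨x, hx, hx1⟩
        obtain ⟨m, hm1, hm2⟩ := hacc x hx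
        rw [hm1] at hx1
        have : m = j := by exact_mod_cast hx1
        omega
      have hstep : aStep tilehit_ids tilehit_times tilehit_primaries (acc, i, p) j =
          (acc.insert (j : Int)
             [PySem.List.slice tilehit_ids (some (i : Int)) (some (j : Int)),
              PySem.List.slice tilehit_times (some (i : Int)) (some (j : Int))],
           j, tilehit_primaries.getD j 0) := by
        unfold aStep
        rw [if_pos hstop]
      rw [hstep]
      have hacc' : ∀ x ∈ (acc.insert (j : Int)
          [PySem.List.slice tilehit_ids (some (i : Int)) (some (j : Int)),
           PySem.List.slice tilehit_times (some (i : Int)) (some (j : Int))]).items,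
          ∃ m : Nat, x.1 = (m : Int) ∧ m ≤ j := by
        intro x hx
        rw [PySem.Dict.items_insert_of_not_contains _ _ hfresh, List.mem_append] at hx
        rcases hx with hx | hx
        · obtain ⟨m, hm1, hm2⟩ := hacc x hx
          exact ⟨m, hm1, by omega⟩
        · simp at hx
          rw [hx]
          exact ⟨j, rfl, le_refl j⟩
      have hrec := ih j (acc.insert (j : Int)
          [PySem.List.slice tilehit_ids (some (i : Int)) (some (j : Int)),
           PySem.List.slice tilehit_times (some (i : Int)) (some (j : Int))]) hjn (by omega) hacc'
      simp only [] at hrec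
      have hnj2 : n - (j + 1) = n - j - 1 := by omega
      rw [hnj2] at hrec
      rw [hrec, PySem.Dict.items_insert_of_not_contains _ _ hfresh]
      rw [if_pos hjn]
      simp
    · -- final run: j = n, the loop is done and the fill-up commits the tail
      have hjn' : j = n := by omega
      have h0 : n - j = 0 := by omega
      rw [h0]
      simp only [List.range'_zero, List.foldl_nil]
      have hine : i ≠ n := by omega
      rw [if_pos (show (¬((acc, i, p).2.1 = n)) from hine)]
      have hfresh : acc.contains ((n : Nat) : Int) = false := by
        rw [PySem.Dict.contains_eq_decide_mem_keys]
        simp only [decide_eq_false_iff_not, PySem.Dict.keys, List.mem_map]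
        rintro ⟨x, hx, hx1⟩
        obtain ⟨m, hm1, hm2⟩ := hacc x hx
        rw [hm1] at hx1
        have : m = n := by exact_mod_cast hx1
        omega
      rw [PySem.Dict.items_insert_of_not_contains _ _ hfresh]
      rw [if_neg (show ¬ j < n by omega), hjn']
      -- the committed times slice times[i:] equals times[i:n] since n = len(times)
      have hts : PySem.List.slice tilehit_times (some (i : Int)) (some ((n : Nat) : Int)) =
          PySem.List.slice tilehit_times (some (i : Int)) none := by
        rw [PySem.List.slice_natCast, PySem.List.slice_some_none, PySem.List.clampIdx_natCast]
        have hmin : min i tilehit_times.length = i := by omega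
        rw [hmin]
        apply List.take_of_length_le
        simp [hn]
      rw [hts]
      rw [runsP_nil tilehit_ids tilehit_times tilehit_primaries n n (by omega)]

-- the delete loop over keys_to_delete is a filter on items
theorem foldl_erase_items (ks : List Int) (d : PySem.Dict Int (List (List Int))) :
    (ks.foldl (fun d key => d.erase key) d).items
      = d.items.filter (fun p => !ks.contains p.1) := by
  induction ks generalizing d with
  | nil => simp
  | cons k ks ih =>
    rw [List.foldl_cons, ih]
    show ((PySem.Dict.erase d k).items).filter _ = _
    unfold PySem.Dict.erase
    simp only [List.filter_filter]
    apply List.filter_congr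
    intro x hx
    by_cases hxk : x.1 = k <;> simp [hxk]

-- A's build-then-delete second pass over any dict with distinct keys is an inline filter
theorem delete_pass (se : PySem.Dict Int (List (List Int))) (hnd : se.keys.Nodup) :
    ((se.keys.foldl
        (fun ks key => if ((se.getD key []).getD 0 []).length = 1 then ks ++ [key] else ks)
        ([] : List Int)).foldl (fun d key => d.erase key) se).items
      = se.items.filter (fun x => !decide ((x.2.getD 0 []).length = 1)) := by
  rw [PySem.List.foldl_append_ite_eq_filter
        (fun key => ((se.getD key []).getD 0 []).length = 1) se.keys []]
  rw [foldl_erase_items]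
  apply List.filter_congr
  intro x hx
  have hxk : x.1 ∈ se.keys := by
    simp only [PySem.Dict.keys, List.mem_map]
    exact ⟨x, hx, rfl⟩
  have hget : se.getD x.1 [] = x.2 :=
    PySem.Dict.getD_of_mem_items se (by simpa using hx) hnd []
  simp [List.mem_filter, hxk, hget]

-- A's whole function, reduced to the same filtered run list
theorem Aresult_eq (tilehit_ids tilehit_times tilehit_primaries : List Int) :
    get_single_tracks_primary_mc tilehit_ids tilehit_times tilehit_primaries
      = (runsP tilehit_ids tilehit_times tilehit_primaries tilehit_times.length 0).filter
          (fun x => !decide ((x.2.getD 0 []).length = 1)) := by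
  unfold get_single_tracks_primary_mc
  simp only []
  set st := (List.range tilehit_times.length).foldl
      (aStep tilehit_ids tilehit_times tilehit_primaries)
      (PySem.Dict.mk [], 0, tilehit_primaries.getD 0 0) with hst
  set se := (if st.2.1 ≠ tilehit_times.length then
      st.1.insert (tilehit_times.length : Int)
        [PySem.List.slice tilehit_ids (some (st.2.1 : Int)) none,
         PySem.List.slice tilehit_times (some (st.2.1 : Int)) none]
    else st.1) with hseDef
  have hse : se = PySem.Dict.mk (runsP tilehit_ids tilehit_times tilehit_primaries tilehit_times.length 0) := by
    rcases Nat.eq_zero_or_pos tilehit_times.length with h0 | hpos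
    · rw [hseDef, hst, runsP_nil _ _ _ _ _ (by omega)]
      simp [h0]
    · obtain ⟨m, hm⟩ : ∃ m, tilehit_times.length = m + 1 := ⟨tilehit_times.length - 1, by omega⟩
      have hkey := afold_runs tilehit_ids tilehit_times tilehit_primaries tilehit_times.length 0
        (PySem.Dict.mk []) hpos (by omega) (by intro x hx; simp at hx)
      simp only [] at hkey
      have hfold : st = (List.range' (0 + 1) (tilehit_times.length - (0 + 1))).foldl
          (aStep tilehit_ids tilehit_times tilehit_primaries)
          (PySem.Dict.mk [], 0, tilehit_primaries.getD 0 0) := by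
        rw [hst, List.range_eq_range']
        conv_lhs => rw [hm, List.range'_succ]
        rw [List.foldl_cons]
        have hsk : aStep tilehit_ids tilehit_times tilehit_primaries
            (PySem.Dict.mk [], 0, tilehit_primaries.getD 0 0) 0 =
            (PySem.Dict.mk [], 0, tilehit_primaries.getD 0 0) := by
          unfold aStep
          rw [if_neg (fun hc => hc rfl)]
        rw [hsk]
        rw [show m = tilehit_times.length - (0 + 1) from by omega]
      apply PySem.Dict.ext
      rw [hseDef, hfold]
      rw [hkey]
      rfl
  rw [hse]
  have hnd : (PySem.Dict.mk (runsP tilehit_ids tilehit_times tilehit_primaries tilehit_times.length 0)).keys.Nodup := by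
    show (List.map (fun x => x.1) (runsP tilehit_ids tilehit_times tilehit_primaries tilehit_times.length 0)).Nodup
    rw [List.Nodup, List.pairwise_map]
    exact runsP_pairwise tilehit_ids tilehit_times tilehit_primaries tilehit_times.length 0
  rw [delete_pass _ hnd]

-- ===== B-side lemmas =====

-- B's relative scan is A-style bRunEnd with the run-start primary as reference
theorem bScan_eq_bRunEnd (primaries : List Int) (n j : Nat) :
    bScan primaries n j = bRunEnd primaries n (primaries.getD 0 0) j := by
  fun_induction bScan with
  | case1 j h ih => rw [bRunEnd, dif_pos h]; exact ih
  | case2 j h => rw [bRunEnd, dif_neg h]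

theorem getD_drop (l : List Int) (i k : Nat) :
    (l.drop i).getD k 0 = l.getD (i + k) 0 := by
  simp [List.getD_eq_getElem?_getD, List.getElem?_drop]

-- the scan over the dropped tail is the absolute scan, shifted
theorem bRunEnd_step (l : List Int) (n : Nat) (p : Int) (j : Nat)
    (h : j < n ∧ l.getD j 0 = p) : bRunEnd l n p j = bRunEnd l n p (j + 1) := by
  conv_lhs => rw [bRunEnd]
  rw [dif_pos h]

theorem bRunEnd_drop (primaries : List Int) (n i : Nat) (p : Int) (hi : i ≤ n) (j : Nat) :
    i + bRunEnd (primaries.drop i) (n - i) p j = bRunEnd primaries n p (i + j) := by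
  fun_induction bRunEnd (primaries.drop i) (n - i) p j with
  | case1 j h ih =>
    rw [bRunEnd_step primaries n p (i + j) ⟨by omega, by rw [← getD_drop]; exact h.2⟩]
    rw [show i + j + 1 = i + (j + 1) from by omega]
    exact ih
  | case2 j h =>
    rw [bRunEnd, dif_neg (fun hc => h ⟨by omega, by rw [getD_drop]; exact hc.2⟩)]

-- B's run recursion over the dropped tails is exactly runsP from index i
theorem bRuns_eq_runsP (ids times primaries : List Int) :
    ∀ (k i : Nat), times.length - i ≤ k → i ≤ times.length →
      bRuns (ids.drop i) (times.drop i) (primaries.drop i) i (times.length - i)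
        = runsP ids times primaries times.length i := by
  intro k
  induction k with
  | zero =>
    intro i hk hi
    rw [bRuns, dif_pos (by omega), runsP_nil _ _ _ _ _ (by omega)]
  | succ k ih =>
    intro i hk hi
    by_cases hlt : i < times.length
    · set n := times.length with hn
      have hne : ¬ (n - i = 0) := by omega
      have hp0 : (primaries.drop i).getD 0 0 = primaries.getD i 0 := by
        simp
      have hjrel : i + bScan (primaries.drop i) (n - i) 1
          = bRunEnd primaries n (primaries.getD i 0) (i + 1) := by
        rw [bScan_eq_bRunEnd, hp0, bRunEnd_drop primaries n i (primaries.getD i 0) (by omega) 1]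
      set jr := bScan (primaries.drop i) (n - i) 1 with hjr
      set ja := bRunEnd primaries n (primaries.getD i 0) (i + 1) with hja
      have hja1 : i + 1 ≤ ja := le_bRunEnd _ _ _ _
      have hja2 : ja ≤ n := bRunEnd_le _ _ _ _ (by omega)
      rw [bRuns, dif_neg hne]
      simp only [← hjr]
      rw [runsP_cons _ _ _ _ _ hlt, ← hja]
      by_cases hend : jr = n - i
      · -- final run: the remainder is one run; B commits the whole tails
        have hjan : ja = n := by omega
        rw [if_pos hend, if_neg (show ¬ ja < n by omega)]
        rw [runsP_nil _ _ _ _ _ (by omega)]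
        have hkey : ((i + (n - i) : Nat) : Int) = ((ja : Nat) : Int) := by omega
        have hids : PySem.List.slice ids (some (i : Int)) none = ids.drop i := by
          rw [PySem.List.slice_from_natCast]
        have htimes : PySem.List.slice times (some (i : Int)) (some ((ja : Nat) : Int))
            = times.drop i := by
          rw [PySem.List.slice_natCast]
          apply List.take_of_length_le
          simp [hjan, hn]
        rw [hkey, hids, htimes]
      · -- inner run: B commits the j-prefix of the tails and recurses on the rest
        have hjr1 : 1 ≤ jr := le_bScan _ _ _
        have hjrn : jr ≤ n - i := by omega
        have hjan : ja < n := by omega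
        rw [if_neg hend, if_pos hjan]
        have hkey : ((i + jr : Nat) : Int) = ((ja : Nat) : Int) := by omega
        have hids : PySem.List.slice (ids.drop i) none (some ((jr : Nat) : Int))
            = PySem.List.slice ids (some (i : Int)) (some ((ja : Nat) : Int)) := by
          rw [PySem.List.slice_to_natCast, PySem.List.slice_natCast]
          congr 1; omega
        have htimes : PySem.List.slice (times.drop i) none (some ((jr : Nat) : Int))
            = PySem.List.slice times (some (i : Int)) (some ((ja : Nat) : Int)) := by
          rw [PySem.List.slice_to_natCast, PySem.List.slice_natCast]
          congr 1; omega
        have htail : bRuns (PySem.List.slice (ids.drop i) (some ((jr : Nat) : Int)) none)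
            (PySem.List.slice (times.drop i) (some ((jr : Nat) : Int)) none)
            (PySem.List.slice (primaries.drop i) (some ((jr : Nat) : Int)) none)
            (i + jr) (n - i - jr)
            = runsP ids times primaries n ja := by
          rw [PySem.List.slice_from_natCast, PySem.List.slice_from_natCast,
              PySem.List.slice_from_natCast, List.drop_drop, List.drop_drop, List.drop_drop]
          have he2 : i + jr = ja := by omega
          have he3 : n - i - jr = n - ja := by omega
          rw [he2, he3]
          exact ih ja (by omega) (by omega)
        rw [hkey, hids, htimes, htail]
    · rw [show times.length - i = 0 from by omega, bRuns, dif_pos rfl,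
          runsP_nil _ _ _ _ _ hlt]

-- B's dict comprehension over a fresh-keyed run list is an inline filter on items
theorem foldl_insert_items (l : List (Int × List (List Int))) :
    ∀ (d : PySem.Dict Int (List (List Int))),
      (∀ x ∈ l, ∀ y ∈ d.items, y.1 ≠ x.1) →
      l.Pairwise (fun a b => a.1 ≠ b.1) →
      (l.foldl (fun d kv => if (kv.2.getD 0 []).length ≠ 1 then d.insert kv.1 kv.2 else d) d).items
        = d.items ++ l.filter (fun x => !decide ((x.2.getD 0 []).length = 1)) := by
  induction l with
  | nil => intro d _ _; simp
  | cons hd tl ih =>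
    intro d hfresh hpw
    rw [List.foldl_cons]
    rcases List.pairwise_cons.mp hpw with ⟨hhd, htl⟩
    by_cases hc : (hd.2.getD 0 []).length ≠ 1
    · rw [if_pos hc]
      have hcont : d.contains hd.1 = false := by
        rw [PySem.Dict.contains_eq_decide_mem_keys]
        simp only [decide_eq_false_iff_not, PySem.Dict.keys, List.mem_map]
        rintro ⟨y, hy, hy1⟩
        exact hfresh hd (by simp) y hy hy1
      have hfresh' : ∀ x ∈ tl, ∀ y ∈ (d.insert hd.1 hd.2).items, y.1 ≠ x.1 := by
        intro x hx y hy
        rw [PySem.Dict.items_insert_of_not_contains _ _ hcont, List.mem_append] at hy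
        rcases hy with hy | hy
        · exact hfresh x (by simp [hx]) y hy
        · simp at hy
          rw [hy]
          exact hhd x hx
      rw [ih (d.insert hd.1 hd.2) hfresh' htl,
          PySem.Dict.items_insert_of_not_contains _ _ hcont,
          List.filter_cons_of_pos (by simpa using hc)]
      simp
    · rw [if_neg hc, ih d (fun x hx => hfresh x (by simp [hx])) htl,
          List.filter_cons_of_neg (by simpa using hc)]

-- B's whole function, reduced to the same filtered run list
theorem Bresult_eq (tilehit_ids tilehit_times tilehit_primaries : List Int) :
    get_single_tracks_primary_mc_alt tilehit_ids tilehit_times tilehit_primaries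
      = (runsP tilehit_ids tilehit_times tilehit_primaries tilehit_times.length 0).filter
          (fun x => !decide ((x.2.getD 0 []).length = 1)) := by
  unfold get_single_tracks_primary_mc_alt
  have hruns : bRuns tilehit_ids tilehit_times tilehit_primaries 0 tilehit_times.length
      = runsP tilehit_ids tilehit_times tilehit_primaries tilehit_times.length 0 := by
    have := bRuns_eq_runsP tilehit_ids tilehit_times tilehit_primaries tilehit_times.length 0
      (by omega) (by omega)
    simpa using this
  rw [hruns]
  rw [foldl_insert_items _ (PySem.Dict.mk []) (by intro x hx y hy; simp at hy)
      (runsP_pairwise tilehit_ids tilehit_times tilehit_primaries tilehit_times.length 0)]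
  rfl

-- ===== VERDICT (by name: the statements are the Claim_ definitions above) =====
theorem get_single_tracks_primary_mc_spec : Claim_equal_get_single_tracks_primary_mc := by
  intro tilehit_ids tilehit_times tilehit_primaries _ _
  unfold Spec_get_single_tracks_primary_mc
  rw [Aresult_eq, Bresult_eq]
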